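-- pv_equiv track=rewrite | github.com/mikkelfo/CORE-BEHRT | ehr2vec/main_pretrain_behrt.py | convert_segment
-- ===== SOURCE A (Python) =====
-- def convert_segment(segments: list):
--     """From segment AABBCC to segment 001100111"""
--     converted_segments = []
--     flag = 0
--     for i, segment in enumerate(segments):
--         converted_segments.append(flag)
--         if i < len(segments) - 1:
--             if segment != segments[i+1]:
--                 flag = 1 - flag
--     return converted_segments
-- ===== SOURCE B (Python) =====
-- def convert_segment(segments: list):
--     """From segment AABBCC to segment 001100"""
--     out = []
--     i = 0
--     g = 0
--     n = len(segments)
--     while i < n: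
--         j = i + 1
--         while j < n and segments[j] == segments[i]:
--             j += 1
--         out.extend([g % 2] * (j - i))
--         g += 1
--         i = j
--     return out
-- ===== Notes on version B (the rewrite author's own statement) =====
-- stated objective: alternative
-- what changed: Replaces the per-element look-ahead comparison with a run-based scan: split the list into maximal runs of equal values and emit g % 2 repeated over each run, where g counts runs.
import Mathlib
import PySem

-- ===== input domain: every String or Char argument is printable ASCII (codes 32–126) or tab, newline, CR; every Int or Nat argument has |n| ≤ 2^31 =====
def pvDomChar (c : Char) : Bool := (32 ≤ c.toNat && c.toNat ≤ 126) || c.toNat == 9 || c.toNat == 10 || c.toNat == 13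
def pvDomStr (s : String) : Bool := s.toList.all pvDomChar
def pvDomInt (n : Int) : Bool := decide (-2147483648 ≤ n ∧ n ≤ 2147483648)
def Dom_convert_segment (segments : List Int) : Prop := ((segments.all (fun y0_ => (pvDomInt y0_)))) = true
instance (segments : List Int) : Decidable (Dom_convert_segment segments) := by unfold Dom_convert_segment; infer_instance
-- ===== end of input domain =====

-- B replaces A's per-element look-ahead with a run-based scan (maximal runs of equal values, run g emits g % 2); alternative decomposition, same cost.


-- ===== PORT A =====
-- for i, segment in enumerate(segments): append flag; if i < n-1 and segments[i+1] != segment: flag = 1 - flag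
def convert_segment (segments : List Int) : List Int :=
  let n := segments.length
  (segments.zipIdx.foldl
    (fun (st : List Int × Int) (p : Int × Nat) =>
      let acc := st.1 ++ [st.2]
      let flag :=
        if p.2 < n - 1 then
          (if p.1 ≠ segments.getD (p.2 + 1) 0 then 1 - st.2 else st.2)
        else st.2
      (acc, flag)) ([], 0)).1

-- ===== PORT B =====
-- inner while loop of Source B: the run of elements equal to the head is the takeWhile prefix,
-- out.extend([g % 2] * runlen) becomes replicate, and the outer while loop the recursion on the rest
def convert_segment_alt_go : List Int → Int → List Int
  | [], _ => []
  | x :: xs, g =>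
      List.replicate ((xs.takeWhile (fun y => y == x)).length + 1) (g % 2)
        ++ convert_segment_alt_go (xs.dropWhile (fun y => y == x)) (g + 1)
termination_by l _ => l.length
decreasing_by
  exact Nat.lt_succ_of_le (xs.length_dropWhile_le _)

def convert_segment_alt (segments : List Int) : List Int :=
  convert_segment_alt_go segments 0

-- ===== PRECONDITION & SPEC =====
def Spec_convert_segment (segments : List Int) (out : List Int) : Prop := out = convert_segment_alt segments
instance (segments : List Int) (out : List Int) : Decidable (Spec_convert_segment segments out) := by unfold Spec_convert_segment; infer_instance

-- ===== CLAIM (what is proved, stated in full; the proofs are below) =====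
def Claim_equal_convert_segment : Prop := ∀ (segments : List Int), Dom_convert_segment segments → Spec_convert_segment segments (convert_segment segments)

-- ===== LEMMAS AND PROOFS =====

-- reference recursion: A's flag evolution, element by element
def fSpec : List Int → Int → List Int
  | [], _ => []
  | [x], flag => (fun _ => [flag]) x
  | x :: y :: rest, flag => flag :: fSpec (y :: rest) (if x ≠ y then 1 - flag else flag)

-- A's foldl over the suffix starting at index k computes acc ++ fSpec of that suffix
theorem foldA_eq_fSpec (s : List Int) (t : List Int) (k : Nat) (acc : List Int) (flag : Int)
    (h : s.drop k = t) :
    (t.zipIdx k |>.foldl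
      (fun (st : List Int × Int) (p : Int × Nat) =>
        let acc := st.1 ++ [st.2]
        let flag :=
          if p.2 < s.length - 1 then
            (if p.1 ≠ s.getD (p.2 + 1) 0 then 1 - st.2 else st.2)
          else st.2
        (acc, flag)) (acc, flag)).1 = acc ++ fSpec t flag := by
  induction t generalizing k acc flag with
  | nil => simp [fSpec]
  | cons x t ih =>
    have hdrop : s.drop (k + 1) = t := by
      rw [← List.tail_drop, h]; rfl
    have hlen : s.length - k = t.length + 1 := by
      have := congrArg List.length h
      simpa using this
    have hk : k < s.length := by omega
    rw [List.zipIdx_cons, List.foldl_cons]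
    rw [ih (k + 1) _ _ hdrop]
    cases t with
    | nil =>
      have hk1 : ¬ k < s.length - 1 := by simp at hlen; omega
      simp [fSpec]
    | cons y rest =>
      have hk1 : k < s.length - 1 := by
        simp at hlen; omega
      have hy : s.getD (k + 1) 0 = y := by
        have h1 : s[(k+1)]? = some y := by
          rw [← List.head?_drop, hdrop]; rfl
        simp [List.getD, h1]
      show (acc ++ [flag]) ++ fSpec (y :: rest) _ = acc ++ fSpec (x :: y :: rest) flag
      rw [show fSpec (x :: y :: rest) flag
            = flag :: fSpec (y :: rest) (if x ≠ y then 1 - flag else flag) from rfl]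
      simp only [hk1, if_pos, hy, List.append_assoc, List.cons_append, List.nil_append]

-- A's flag recursion over a list splits at the first maximal run
theorem fSpec_run (xs : List Int) (x : Int) (flag : Int) :
    fSpec (x :: xs) flag
      = List.replicate ((xs.takeWhile (fun y => y == x)).length + 1) flag
          ++ fSpec (xs.dropWhile (fun y => y == x)) (1 - flag) := by
  induction xs generalizing x flag with
  | nil => simp [fSpec]
  | cons y rest ih =>
    by_cases hxy : y = x
    · subst hxy
      have h1 : fSpec (y :: y :: rest) flag = flag :: fSpec (y :: rest) flag := by
        simp [fSpec]
      rw [h1, ih y flag]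
      simp [List.replicate_succ]
    · have hne : x ≠ y := fun hh => hxy hh.symm
      have h1 : fSpec (x :: y :: rest) flag
          = flag :: fSpec (y :: rest) (1 - flag) := by
        simp [fSpec, hne]
      rw [h1]
      simp [hxy]

-- B's run-based recursion computes fSpec with flag g % 2
theorem go_eq_fSpec (l : List Int) (g : Int) :
    convert_segment_alt_go l g = fSpec l (g % 2) := by
  fun_induction convert_segment_alt_go l g with
  | case1 g => simp [fSpec]
  | case2 x xs g ih =>
    rw [fSpec_run, ih, show (g + 1) % 2 = 1 - g % 2 from by omega]

-- ===== VERDICT (by name: the statement is the Claim_ definition above) =====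
theorem convert_segment_spec : Claim_equal_convert_segment := by
  intro segments _
  show convert_segment segments = convert_segment_alt segments
  unfold convert_segment convert_segment_alt
  rw [go_eq_fSpec]
  have h0 : (0 : Int) % 2 = 0 := rfl
  rw [h0]
  simpa using foldA_eq_fSpec segments segments 0 [] 0 (by simp)
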